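-- pv_equiv track=rewrite | github.com/Ananta-dot/misr_new | pb+rl.py | covers_grid_closed
-- ===== SOURCE A (Python) =====
-- from typing import Dict, List, Tuple, Optional
--
-- Rect=Tuple[Tuple[int,int],Tuple[int,int]]; Point=Tuple[int,int]
--
-- Rect=Tuple[Tuple[int,int],Tuple[int,int]]; Point=Tuple[int,int]
--
-- def covers_grid_closed(rects:List[Rect], pts:List[Point])->Tuple[List[List[int]],List[List[int]]]:
--     covers=[]; rect_to_constr=[[] for _ in rects]
--     for p_idx,(x,y) in enumerate(pts):
--         S=[]
--         for i,((x1,x2),(y1,y2)) in enumerate(rects):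
--             if (x1<=x<=x2) and (y1<=y<=y2): S.append(i)
--         covers.append(S)
--         for i in S: rect_to_constr[i].append(p_idx)
--     return covers,rect_to_constr
-- ===== SOURCE B (Python) =====
-- def covers_grid_closed(rects, pts):
--     def inside(rect, p):
--         (x1, x2), (y1, y2) = rect
--         x, y = p
--         return x1 <= x <= x2 and y1 <= y <= y2
--     covers = [[i for i, r in enumerate(rects) if inside(r, p)] for p in pts]
--     rect_to_constr = [[j for j, p in enumerate(pts) if inside(r, p)] for r in rects]
--     return covers, rect_to_constr
-- ===== Notes on version B (the rewrite author's own statement) =====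
-- stated objective: simpler
-- what changed: Replaces the stateful point-major pass that builds rect_to_constr by appending through the shared S list with two independent direct comprehensions, one per output, with no mutable accumulators.
import Mathlib
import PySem

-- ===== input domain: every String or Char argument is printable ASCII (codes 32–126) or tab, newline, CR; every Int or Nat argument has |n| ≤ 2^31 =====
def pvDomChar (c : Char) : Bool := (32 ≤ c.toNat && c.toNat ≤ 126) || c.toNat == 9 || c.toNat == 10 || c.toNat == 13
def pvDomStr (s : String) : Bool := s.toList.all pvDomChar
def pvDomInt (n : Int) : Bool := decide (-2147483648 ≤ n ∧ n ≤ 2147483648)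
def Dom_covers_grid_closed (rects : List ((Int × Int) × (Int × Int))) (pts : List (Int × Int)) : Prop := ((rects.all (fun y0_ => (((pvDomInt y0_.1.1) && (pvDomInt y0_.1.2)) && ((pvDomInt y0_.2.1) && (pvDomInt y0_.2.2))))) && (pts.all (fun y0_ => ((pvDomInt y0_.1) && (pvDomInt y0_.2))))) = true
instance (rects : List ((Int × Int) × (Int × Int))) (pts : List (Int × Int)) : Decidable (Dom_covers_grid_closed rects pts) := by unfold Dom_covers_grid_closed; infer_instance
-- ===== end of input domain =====

-- B change: the stateful point-major pass that appends into rect_to_constr through the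
-- shared S list is replaced by two independent direct comprehensions, one per output
-- (objective: simpler; same return value).

-- ===== PORT A =====
-- the body of A's outer 'for p_idx,(x,y) in enumerate(pts)' loop, as a named step function:
-- build S by the inner append loop, push S onto covers, then 'for i in S: rect_to_constr[i].append(p_idx)'
def pvStepA (rects : List ((Int × Int) × (Int × Int))) (st : List (List Int) × List (List Int))
    (pe : Int × (Int × Int)) : List (List Int) × List (List Int) :=
  let S : List Int := (PySem.List.enumerate rects).foldl
    (fun S ir =>
      if ir.2.1.1 ≤ pe.2.1 ∧ pe.2.1 ≤ ir.2.1.2 ∧ ir.2.2.1 ≤ pe.2.2 ∧ pe.2.2 ≤ ir.2.2.2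
      then S ++ [ir.1] else S) []
  (st.1 ++ [S],
   S.foldl (fun r2c i => r2c.modify i.toNat (fun row => row ++ [pe.1])) st.2)

def covers_grid_closed (rects : List ((Int × Int) × (Int × Int))) (pts : List (Int × Int)) : List (List Int) × List (List Int) :=
  (PySem.List.enumerate pts).foldl (pvStepA rects)
    (([] : List (List Int)), rects.map (fun _ => ([] : List Int)))

-- ===== PORT B =====
def pvInsideB (r : (Int × Int) × (Int × Int)) (p : Int × Int) : Bool :=
  decide (r.1.1 ≤ p.1 ∧ p.1 ≤ r.1.2 ∧ r.2.1 ≤ p.2 ∧ p.2 ≤ r.2.2)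

def covers_grid_closed_alt (rects : List ((Int × Int) × (Int × Int))) (pts : List (Int × Int)) : List (List Int) × List (List Int) :=
  (pts.map (fun p => ((PySem.List.enumerate rects).filter (fun ir => pvInsideB ir.2 p)).map (·.1)),
   rects.map (fun r => ((PySem.List.enumerate pts).filter (fun jp => pvInsideB r jp.2)).map (·.1)))

-- ===== PRECONDITION & SPEC =====
def Spec_covers_grid_closed (rects : List ((Int × Int) × (Int × Int))) (pts : List (Int × Int)) (out : List (List Int) × List (List Int)) : Prop := out = covers_grid_closed_alt rects pts
instance (rects : List ((Int × Int) × (Int × Int))) (pts : List (Int × Int)) (out : List (List Int) × List (List Int)) : Decidable (Spec_covers_grid_closed rects pts out) := by unfold Spec_covers_grid_closed; infer_instance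

-- ===== CLAIM (what is proved, stated in full; the proofs are below) =====
def Claim_equal_covers_grid_closed : Prop := ∀ (rects : List ((Int × Int) × (Int × Int))) (pts : List (Int × Int)), Dom_covers_grid_closed rects pts → Spec_covers_grid_closed rects pts (covers_grid_closed rects pts)

-- ===== LEMMAS AND PROOFS =====

-- B's covers row for a point p (also what A's inner loop computes)
def pvS (rects : List ((Int × Int) × (Int × Int))) (p : Int × Int) : List Int :=
  ((PySem.List.enumerate rects).filter (fun ir => pvInsideB ir.2 p)).map (·.1)

theorem pvS_eq_inner (rects : List ((Int × Int) × (Int × Int))) (p : Int × Int) :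
    (PySem.List.enumerate rects).foldl
      (fun S ir =>
        if ir.2.1.1 ≤ p.1 ∧ p.1 ≤ ir.2.1.2 ∧ ir.2.2.1 ≤ p.2 ∧ p.2 ≤ ir.2.2.2
        then S ++ [ir.1] else S) [] = pvS rects p := by
  rw [PySem.List.foldl_append_ite
      (p := fun ir : Int × ((Int × Int) × (Int × Int)) =>
        ir.2.1.1 ≤ p.1 ∧ p.1 ≤ ir.2.1.2 ∧ ir.2.2.1 ≤ p.2 ∧ p.2 ≤ ir.2.2.2)]
  rfl

theorem pvStepA_eq (rects : List ((Int × Int) × (Int × Int))) (st : List (List Int) × List (List Int))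
    (pe : Int × (Int × Int)) :
    pvStepA rects st pe =
      (st.1 ++ [pvS rects pe.2],
       (pvS rects pe.2).foldl (fun r2c i => r2c.modify i.toNat (fun row => row ++ [pe.1])) st.2) := by
  unfold pvStepA
  rw [pvS_eq_inner]

theorem pvS_pairwise (rects : List ((Int × Int) × (Int × Int))) (p : Int × Int) :
    (pvS rects p).Pairwise (· < ·) := by
  unfold pvS
  exact List.Pairwise.map _ (fun _ _ h => h)
    ((PySem.List.pairwise_lt_enumerate rects 0).filter _)

theorem pvS_nonneg (rects : List ((Int × Int) × (Int × Int))) (p : Int × Int) :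
    ∀ i ∈ pvS rects p, 0 ≤ i := by
  intro i hi
  unfold pvS at hi
  obtain ⟨ir, hmem, rfl⟩ := List.mem_map.1 hi
  obtain ⟨k, hk, rfl⟩ := (PySem.List.mem_enumerate_iff rects 0 ir).1 (List.mem_filter.1 hmem).1
  simp

theorem mem_pvS (rects : List ((Int × Int) × (Int × Int))) (p : Int × Int) (j : Nat) :
    ((j : Int) ∈ pvS rects p) ↔ ∃ h : j < rects.length, pvInsideB rects[j] p = true := by
  unfold pvS
  constructor
  · intro h
    obtain ⟨ir, hmem, hfst⟩ := List.mem_map.1 h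
    obtain ⟨hin, hins⟩ := List.mem_filter.1 hmem
    obtain ⟨k, hk, rfl⟩ := (PySem.List.mem_enumerate_iff rects 0 ir).1 hin
    have hkj : k = j := by simpa using hfst
    subst hkj
    exact ⟨hk, hins⟩
  · rintro ⟨h, hins⟩
    refine List.mem_map.2 ⟨((j : Int), rects[j]), List.mem_filter.2 ⟨?_, hins⟩, rfl⟩
    exact (PySem.List.mem_enumerate_iff rects 0 _).2 ⟨j, h, by simp⟩

theorem pv_len_modfold (S : List Int) (L : List (List Int)) (v : Int) :
    (S.foldl (fun acc i => acc.modify i.toNat (fun row => row ++ [v])) L).length = L.length := by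
  induction S generalizing L with
  | nil => rfl
  | cons a t ih => rw [List.foldl_cons, ih, List.length_modify]

theorem pv_getElem?_modfold (S : List Int) (hS : S.Pairwise (· < ·)) (h0 : ∀ i ∈ S, 0 ≤ i)
    (L : List (List Int)) (v : Int) (j : Nat) :
    (S.foldl (fun acc i => acc.modify i.toNat (fun row => row ++ [v])) L)[j]?
      = L[j]?.map (fun row => row ++ (if (j : Int) ∈ S then [v] else [])) := by
  induction S generalizing L with
  | nil => cases hLj : L[j]? <;> simp [hLj]
  | cons a t ih =>
    have ha0 : 0 ≤ a := h0 a (by simp)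
    rw [List.foldl_cons,
        ih hS.of_cons (fun i hi => h0 i (List.mem_cons_of_mem _ hi)),
        List.getElem?_modify]
    cases hLj : L[j]? with
    | none => simp
    | some row =>
      simp only [Option.map_some]
      by_cases hcase : a.toNat = j
      · have haj : a = (j : Int) := by omega
        have hnt : (j : Int) ∉ t := by
          intro hmem
          have := (List.pairwise_cons.mp hS).1 _ hmem
          omega
        simp [haj, hnt]
      · have haj : a ≠ (j : Int) := by omega
        have hm : ((j : Int) ∈ a :: t) ↔ ((j : Int) ∈ t) := by
          simp [List.mem_cons, Ne.symm haj]
        simp [hcase, hm]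

-- invariant of A's outer loop
theorem pv_outer (rects : List ((Int × Int) × (Int × Int))) (l : List (Int × (Int × Int)))
    (c L : List (List Int)) :
    (l.foldl (pvStepA rects) (c, L)).1 = c ++ l.map (fun pe => pvS rects pe.2)
    ∧ (l.foldl (pvStepA rects) (c, L)).2.length = L.length
    ∧ ∀ (j : Nat) (hj : j < rects.length),
        (l.foldl (pvStepA rects) (c, L)).2[j]?
          = L[j]?.map (fun row =>
              row ++ (l.filter (fun pe => pvInsideB rects[j] pe.2)).map (·.1)) := by
  induction l generalizing c L with
  | nil =>
    refine ⟨by simp, rfl, ?_⟩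
    intro j hj
    cases hLj : L[j]? <;> simp [hLj]
  | cons pe l ih =>
    rw [List.foldl_cons, pvStepA_eq]
    obtain ⟨ih1, ih2, ih3⟩ := ih (c ++ [pvS rects pe.2])
      ((pvS rects pe.2).foldl (fun r2c i => r2c.modify i.toNat (fun row => row ++ [pe.1])) L)
    refine ⟨by rw [ih1]; simp, by rw [ih2, pv_len_modfold], ?_⟩
    intro j hj
    rw [ih3 j hj, pv_getElem?_modfold _ (pvS_pairwise rects pe.2) (pvS_nonneg rects pe.2)]
    have hmem : ((j : Int) ∈ pvS rects pe.2) ↔ pvInsideB rects[j] pe.2 = true := by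
      rw [mem_pvS]; exact ⟨fun ⟨_, h⟩ => h, fun h => ⟨hj, h⟩⟩
    cases hLj : L[j]? with
    | none => simp
    | some row =>
      simp only [Option.map_some]
      by_cases hin : pvInsideB rects[j] pe.2 = true
      · rw [List.filter_cons_of_pos (by simpa using hin)]
        simp [hmem.2 hin, List.append_assoc]
      · rw [List.filter_cons_of_neg (by simpa using hin)]
        have hnm : (j : Int) ∉ pvS rects pe.2 := fun h => hin (hmem.1 h)
        simp [hnm]

-- ===== VERDICT (by name: the statement is the Claim_ definition above) =====
theorem covers_grid_closed_spec : Claim_equal_covers_grid_closed := by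
  intro rects pts _
  unfold Spec_covers_grid_closed covers_grid_closed covers_grid_closed_alt
  obtain ⟨h1, h2, h3⟩ := pv_outer rects (PySem.List.enumerate pts) [] (rects.map (fun _ => []))
  refine Prod.ext ?_ ?_
  · rw [h1]
    have h4 : pts.map (fun p => ((PySem.List.enumerate rects).filter (fun ir => pvInsideB ir.2 p)).map (·.1))
        = ((PySem.List.enumerate pts).map (·.2)).map (fun p => pvS rects p) := by
      rw [PySem.List.map_snd_enumerate]; rfl
    rw [h4, List.map_map]
    rfl
  · apply List.ext_getElem?
    intro j
    by_cases hj : j < rects.length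
    · rw [h3 j hj]
      rw [List.getElem?_map, List.getElem?_map]
      have hjm : (rects.map (fun _ => ([] : List Int)))[j]? = some [] := by
        rw [List.getElem?_map, List.getElem?_eq_getElem hj]
        rfl
      rw [List.getElem?_eq_getElem hj]
      simp
    · have ha : ((PySem.List.enumerate pts).foldl (pvStepA rects)
          (([] : List (List Int)), rects.map (fun _ => ([] : List Int)))).2[j]? = none := by
        rw [List.getElem?_eq_none_iff]
        rw [h2]
        simpa using Nat.le_of_not_lt hj
      have hb : (rects.map (fun r =>
          ((PySem.List.enumerate pts).filter (fun jp => pvInsideB r jp.2)).map (·.1)))[j]? = none := by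
        rw [List.getElem?_eq_none_iff]
        simpa using Nat.le_of_not_lt hj
      rw [ha, hb]
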